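-- pv_equiv track=rewrite | github.com/tomatyss/taskter | agent_executor.py | _is_task_completed
-- ===== SOURCE A (Python) =====
-- from typing import Dict, List, Any
--
-- def _is_task_completed(response: Dict, conversation: List[Dict]) -> bool:
--     """Check if the task has been completed based on the response"""
--     content = response.get('content', '')
--     if not content:
--         return False
--
--     # Look for completion indicators
--     completion_indicators = [
--         'TASK_COMPLETED',
--         'task completed',
--         'task is completed',
--         'successfully completed',
--         'finished the task'
--     ]
--
--     content_lower = content.lower()
--     return any(indicator.lower() in content_lower for indicator in completion_indicators)
-- ===== SOURCE B (Python) =====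
-- def _is_task_completed(response, conversation):
--     """Check if the task has been completed based on the response"""
--     content = response.get('content', '')
--     if not content:
--         return False
--
--     indicators = (
--         'task_completed',
--         'task completed',
--         'task is completed',
--         'successfully completed',
--         'finished the task',
--     )
--
--     text = content.lower()
--     # single left-to-right positional scan: at each index try every indicator
--     for i in range(len(text)):
--         for ind in indicators:
--             if text.startswith(ind, i):
--                 return True
--     return False
-- ===== Notes on version B (the rewrite author's own statement) =====
-- stated objective: alternative
-- what changed: Replaces the five independent substring-membership tests with one left-to-right positional scan of the lowered content that tries each indicator as a prefix at every index.
import Mathlib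
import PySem

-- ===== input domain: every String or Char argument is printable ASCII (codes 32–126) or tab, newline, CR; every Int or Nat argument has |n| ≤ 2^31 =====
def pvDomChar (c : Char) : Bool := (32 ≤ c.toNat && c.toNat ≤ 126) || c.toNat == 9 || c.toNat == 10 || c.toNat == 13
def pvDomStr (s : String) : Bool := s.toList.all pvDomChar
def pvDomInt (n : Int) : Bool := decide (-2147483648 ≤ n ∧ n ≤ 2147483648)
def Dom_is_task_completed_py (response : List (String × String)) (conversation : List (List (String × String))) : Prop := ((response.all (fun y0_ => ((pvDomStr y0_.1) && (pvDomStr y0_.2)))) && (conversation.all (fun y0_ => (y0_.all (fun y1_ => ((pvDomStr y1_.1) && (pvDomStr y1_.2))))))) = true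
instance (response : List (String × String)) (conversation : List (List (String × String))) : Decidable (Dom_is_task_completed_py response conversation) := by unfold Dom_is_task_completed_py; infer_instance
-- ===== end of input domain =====

-- ===== PORT A =====
-- B replaces the five independent substring-membership tests by one positional prefix scan
-- over the lowered content (alternative decomposition; return value only, no speed claim).
def indicatorsA : List String :=
  ["TASK_COMPLETED", "task completed", "task is completed",
   "successfully completed", "finished the task"]

def is_task_completed_py (response : List (String × String)) (conversation : List (List (String × String))) : Bool :=
  let content := (PySem.Dict.mk response).getD "content" ""
  if content = "" then false
  else
    let content_lower := PySem.Str.lower content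
    indicatorsA.any (fun ind => PySem.Str.isIn (PySem.Str.lower ind) content_lower)

-- ===== PORT B =====
def indicatorsB : List (List Char) :=
  ["task_completed".toList, "task completed".toList, "task is completed".toList,
   "successfully completed".toList, "finished the task".toList]

-- B's two nested loops: walk the positions (suffixes) of the text, trying each indicator as a prefix
def scanB (inds : List (List Char)) : List Char → Bool
  | [] => false
  | c :: t => if inds.any (fun p => p.isPrefixOf (c :: t)) then true else scanB inds t

def is_task_completed_py_alt (response : List (String × String)) (conversation : List (List (String × String))) : Bool :=
  let content := (PySem.Dict.mk response).getD "content" ""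
  if content = "" then false
  else scanB indicatorsB (PySem.Chars.lower content.toList)

-- ===== PRECONDITION & SPEC =====
def Spec_is_task_completed_py (response : List (String × String)) (conversation : List (List (String × String))) (out : Bool) : Prop := out = is_task_completed_py_alt response conversation
instance (response : List (String × String)) (conversation : List (List (String × String))) (out : Bool) : Decidable (Spec_is_task_completed_py response conversation out) := by unfold Spec_is_task_completed_py; infer_instance

-- ===== CLAIM (what is proved, stated in full; the proofs are below) =====
def Claim_equal_is_task_completed_py : Prop := ∀ (response : List (String × String)) (conversation : List (List (String × String))), Dom_is_task_completed_py response conversation → Spec_is_task_completed_py response conversation (is_task_completed_py response conversation)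

-- ===== LEMMAS AND PROOFS =====

lemma scanB_eq_any_isIn (inds : List (List Char)) (h : ∀ p ∈ inds, p ≠ []) (cs : List Char) :
    scanB inds cs = inds.any (fun p => PySem.Chars.isIn p cs) := by
  induction cs with
  | nil =>
    simp only [scanB]
    symm
    rw [List.any_eq_false]
    intro p hp hb
    exact h p hp (List.eq_nil_of_infix_nil ((PySem.Chars.isIn_iff_infix p []).1 hb))
  | cons c t ih =>
    by_cases hc : inds.any (fun p => p.isPrefixOf (c :: t)) = true
    · rw [scanB, if_pos hc]
      symm; rw [List.any_eq_true]
      obtain ⟨p, hp, hpre⟩ := List.any_eq_true.1 hc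
      exact ⟨p, hp, (PySem.Chars.isIn_iff_infix p _).2 (List.isPrefixOf_iff_prefix.1 hpre).isInfix⟩
    · rw [scanB, if_neg hc, ih]
      apply Bool.eq_iff_iff.mpr
      simp only [List.any_eq_true]
      constructor
      · rintro ⟨p, hp, hb⟩
        exact ⟨p, hp, (PySem.Chars.isIn_iff_infix p _).2
          (List.infix_cons ((PySem.Chars.isIn_iff_infix p t).1 hb))⟩
      · rintro ⟨p, hp, hb⟩
        rcases List.infix_cons_iff.1 ((PySem.Chars.isIn_iff_infix p _).1 hb) with hpre | hinf
        · exact (hc (List.any_eq_true.2 ⟨p, hp, List.isPrefixOf_iff_prefix.2 hpre⟩)).elim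
        · exact ⟨p, hp, (PySem.Chars.isIn_iff_infix p t).2 hinf⟩

-- ===== VERDICT (by name: the statement is the Claim_ definition above) =====
theorem is_task_completed_py_spec : Claim_equal_is_task_completed_py := by
  intro response conversation _
  unfold Spec_is_task_completed_py is_task_completed_py is_task_completed_py_alt
  set content := (PySem.Dict.mk response).getD "content" "" with hcontent
  by_cases hz : content = ""
  · simp [hz]
  · simp only [if_neg hz]
    rw [scanB_eq_any_isIn indicatorsB (by decide)]
    simp only [indicatorsA, indicatorsB, List.any_cons, List.any_nil]
    simp only [PySem.Str.isIn_eq, PySem.Str.toList_lower]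
    rfl
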